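-- pv_equiv track=rewrite | github.com/junebug-junie/Orion-Sapienform | orion/spark/spark_engine.py | _channel_from_tags
-- ===== SOURCE A (Python) =====
-- from typing import Dict, Any, List, Optional
--
-- def _channel_from_tags(tags: List[str] | None) -> str:
--     tags = tags or []
--     lowered = [t.lower() for t in tags]
--     if any(t.startswith("signal_type:equilibrium") or "equilibrium" in t for t in lowered):
--         return "equilibrium"
--     if any(t.startswith("verb:plan") or t.startswith("mode:plan") for t in lowered):
--         return "plan"
--     if any("system" == t or t.startswith("system") for t in lowered):
--         return "system"
--     return "chat"
-- ===== SOURCE B (Python) =====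
-- def _channel_from_tags(tags):
--     is_equilibrium = is_plan = is_system = False
--     for t in (tags or []):
--         l = t.lower()
--         if "equilibrium" in l:
--             is_equilibrium = True
--         if l.startswith("verb:plan") or l.startswith("mode:plan"):
--             is_plan = True
--         if l.startswith("system"):
--             is_system = True
--     if is_equilibrium:
--         return "equilibrium"
--     if is_plan:
--         return "plan"
--     if is_system:
--         return "system"
--     return "chat"
-- ===== Notes on version B (the rewrite author's own statement) =====
-- stated objective: simpler
-- what changed: Replaces three separate any() scans over a pre-lowered copy with one flag-collecting pass that lowers each tag inline, and simplifies the redundant predicates (a 'signal_type:equilibrium' prefix already contains 'equilibrium'; 'system' == t already implies the 'system' prefix); priority is applied after the loop.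
import Mathlib
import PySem

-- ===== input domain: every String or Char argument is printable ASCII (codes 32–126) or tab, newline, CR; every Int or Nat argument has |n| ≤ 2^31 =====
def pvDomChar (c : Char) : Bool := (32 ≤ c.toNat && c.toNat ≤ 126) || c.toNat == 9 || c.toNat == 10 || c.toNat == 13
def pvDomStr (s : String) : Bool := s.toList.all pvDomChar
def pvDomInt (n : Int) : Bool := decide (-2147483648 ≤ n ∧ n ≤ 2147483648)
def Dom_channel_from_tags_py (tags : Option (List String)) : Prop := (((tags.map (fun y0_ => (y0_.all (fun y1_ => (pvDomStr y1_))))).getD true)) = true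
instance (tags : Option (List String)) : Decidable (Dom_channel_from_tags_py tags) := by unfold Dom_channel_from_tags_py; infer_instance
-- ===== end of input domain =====

-- B is a single flag-collecting pass with simplified predicates instead of three any() scans over a pre-lowered copy (objective: simpler).

-- ===== PORT A =====
def channel_from_tags_py (tags : Option (List String)) : String :=
  let ts := tags.getD []                     -- `tags or []` (some [] behaves as [])
  let lowered := ts.map PySem.Str.lower
  if lowered.any (fun t => PySem.Str.startswith t "signal_type:equilibrium" || PySem.Str.isIn "equilibrium" t) then
    "equilibrium"
  else if lowered.any (fun t => PySem.Str.startswith t "verb:plan" || PySem.Str.startswith t "mode:plan") then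
    "plan"
  else if lowered.any (fun t => ("system" == t) || PySem.Str.startswith t "system") then
    "system"
  else
    "chat"

-- ===== PORT B =====
-- one pass: lower each tag inline, set the three flags; decide priority after the loop
def chanFlagsStep (acc : Bool × Bool × Bool) (t : String) : Bool × Bool × Bool :=
  let l := PySem.Str.lower t
  (acc.1 || PySem.Str.isIn "equilibrium" l,
   acc.2.1 || PySem.Str.startswith l "verb:plan" || PySem.Str.startswith l "mode:plan",
   acc.2.2 || PySem.Str.startswith l "system")

def channel_from_tags_py_alt (tags : Option (List String)) : String :=
  let f := (tags.getD []).foldl chanFlagsStep (false, false, false)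
  if f.1 then "equilibrium"
  else if f.2.1 then "plan"
  else if f.2.2 then "system"
  else "chat"

-- ===== PRECONDITION & SPEC =====
def Spec_channel_from_tags_py (tags : Option (List String)) (out : String) : Prop := out = channel_from_tags_py_alt tags
instance (tags : Option (List String)) (out : String) : Decidable (Spec_channel_from_tags_py tags out) := by unfold Spec_channel_from_tags_py; infer_instance

-- ===== CLAIM (what is proved, stated in full; the proofs are below) =====
def Claim_equal_channel_from_tags_py : Prop := ∀ (tags : Option (List String)), Dom_channel_from_tags_py tags → Spec_channel_from_tags_py tags (channel_from_tags_py tags)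

-- ===== LEMMAS AND PROOFS =====

-- B's fold of the three flags computes the three any's
theorem chanFlags_foldl (l : List String) (acc : Bool × Bool × Bool) :
    l.foldl chanFlagsStep acc =
      (acc.1 || l.any (fun t => PySem.Str.isIn "equilibrium" (PySem.Str.lower t)),
       acc.2.1 || l.any (fun t => PySem.Str.startswith (PySem.Str.lower t) "verb:plan" || PySem.Str.startswith (PySem.Str.lower t) "mode:plan"),
       acc.2.2 || l.any (fun t => PySem.Str.startswith (PySem.Str.lower t) "system")) := by
  induction l generalizing acc with
  | nil => simp
  | cons h tl ih =>
      simp [List.foldl_cons, ih, chanFlagsStep, Bool.or_assoc]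

-- a "signal_type:equilibrium" prefix already contains "equilibrium"
theorem eq_pred_simp (t : String) :
    (PySem.Str.startswith t "signal_type:equilibrium" || PySem.Str.isIn "equilibrium" t)
      = PySem.Str.isIn "equilibrium" t := by
  cases hs : PySem.Str.startswith t "signal_type:equilibrium" with
  | false => simp
  | true =>
      have hp : ("signal_type:equilibrium").toList <+: t.toList := by
        simpa using (PySem.Chars.startswith_iff t.toList ("signal_type:equilibrium").toList).mp (by simpa [PySem.Str.startswith] using hs)
      have hi : ("equilibrium").toList <:+: ("signal_type:equilibrium").toList := by decide
      have : ("equilibrium").toList <:+: t.toList := hi.trans hp.isInfix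
      have := (PySem.Chars.isIn_iff_infix ("equilibrium").toList t.toList).mpr this
      simpa [PySem.Str.isIn_eq] using this

-- "system" == t already implies the "system" prefix
theorem sys_pred_simp (t : String) :
    (("system" == t) || PySem.Str.startswith t "system") = PySem.Str.startswith t "system" := by
  cases he : ("system" == t) with
  | false => simp
  | true =>
      have ht : t = "system" := (beq_iff_eq.mp he).symm
      subst ht
      simp
      decide

theorem channel_from_tags_eq (tags : Option (List String)) :
    channel_from_tags_py tags = channel_from_tags_py_alt tags := by
  unfold channel_from_tags_py channel_from_tags_py_alt
  simp only [chanFlags_foldl, List.any_map, Function.comp_def, Bool.false_or]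
  simp only [eq_pred_simp, sys_pred_simp]

-- ===== VERDICT (by name: the statement is the Claim_ definition above) =====
theorem channel_from_tags_py_spec : Claim_equal_channel_from_tags_py := by
  intro tags _
  exact channel_from_tags_eq tags
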